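-- pv_equiv track=rewrite | github.com/wer-inc/gogooku3 | scripts/components/listed_info_manager.py | _get_month_start_days
-- ===== SOURCE A (Python) =====
-- def _get_month_start_days(business_days: list[str]) -> list[str]:
--     """月初営業日を抽出"""
--     month_starts = []
--     current_month = None
--
--     for date in sorted(business_days):
--         month = date[:7]  # YYYY-MM
--         if month != current_month:
--             month_starts.append(date)
--             current_month = month
--
--     return month_starts
-- ===== SOURCE B (Python) =====
-- def _get_month_start_days(business_days: list[str]) -> list[str]:
--     """Group by month in one dict pass, then sort only the distinct months."""
--     first = {}
--     for date in business_days: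
--         month = date[:7]
--         if month not in first or date < first[month]:
--             first[month] = date
--     return [first[month] for month in sorted(first)]
-- ===== Notes on version B (the rewrite author's own statement) =====
-- stated objective: alternative
-- what changed: B replaces sort-all-dates-then-sweep by a single dict pass keeping the minimum date per month, sorting only the distinct months at the end.
import Mathlib
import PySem

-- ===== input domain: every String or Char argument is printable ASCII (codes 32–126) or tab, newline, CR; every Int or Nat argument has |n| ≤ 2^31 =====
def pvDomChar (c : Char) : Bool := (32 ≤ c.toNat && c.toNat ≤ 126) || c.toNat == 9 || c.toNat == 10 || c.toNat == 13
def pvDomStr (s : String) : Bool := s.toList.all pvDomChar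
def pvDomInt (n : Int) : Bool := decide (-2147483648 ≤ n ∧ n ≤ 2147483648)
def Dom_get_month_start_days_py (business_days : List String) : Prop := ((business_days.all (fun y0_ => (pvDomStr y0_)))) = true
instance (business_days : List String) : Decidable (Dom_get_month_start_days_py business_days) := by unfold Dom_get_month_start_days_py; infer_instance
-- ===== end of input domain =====

-- B groups the dates by month in one dict pass and sorts only the distinct months,
-- instead of sorting every date and sweeping (objective: alternative; return value only, no mutation).

-- date[:7], the YYYY-MM month key (shared primitive of both ports)
def pvMonth (s : String) : String := PySem.Str.slice s none (some 7)

-- ===== PORT A =====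
-- loop body of A: append date when its month differs from the current month
def astep (st : List String × Option String) (date : String) : List String × Option String :=
  let month := pvMonth date
  if some month ≠ st.2 then (st.1 ++ [date], some month) else st

def get_month_start_days_py (business_days : List String) : List String :=
  ((PySem.List.sorted business_days (fun x => x) false).foldl astep ([], none)).1

-- ===== PORT B =====
-- loop body of B: 'if month not in first or date < first[month]: first[month] = date'
def bstep (d : PySem.Dict String String) (date : String) : PySem.Dict String String :=
  let month := pvMonth date
  match d.get? month with
  | none => d.insert month date
  | some v => if date < v then d.insert month date else d

def get_month_start_days_py_alt (business_days : List String) : List String :=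
  let first := business_days.foldl bstep PySem.Dict.empty
  -- 'first[month]' for month ∈ sorted(first): the key is always present, so getD "" is exact
  (PySem.List.sorted first.keys (fun x => x) false).map (fun month => first.getD month "")

-- ===== PRECONDITION & SPEC =====
def Spec_get_month_start_days_py (business_days : List String) (out : List String) : Prop := out = get_month_start_days_py_alt business_days
instance (business_days : List String) (out : List String) : Decidable (Spec_get_month_start_days_py business_days out) := by unfold Spec_get_month_start_days_py; infer_instance

-- ===== CLAIM (what is proved, stated in full; the proofs are below) =====
def Claim_equal_get_month_start_days_py : Prop := ∀ (business_days : List String), Dom_get_month_start_days_py business_days → Spec_get_month_start_days_py business_days (get_month_start_days_py business_days)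

-- ===== LEMMAS AND PROOFS =====

-- running minimum update: new candidate x against current best c (first write wins ties — equal strings anyway)
def upd (c : Option String) (x : String) : Option String :=
  match c with
  | none => some x
  | some v => if x < v then some x else some v

-- the value B's dict holds at key m after scanning l, starting from best c
def runmin (m : String) (l : List String) (c : Option String) : Option String :=
  l.foldl (fun c x => if pvMonth x = m then upd c x else c) c

-- A's sweep as a structural recursion (append-at-front form of the fold)
def gf (m? : Option String) : List String → List String
  | [] => []
  | x :: t => if some (pvMonth x) ≠ m? then x :: gf (some (pvMonth x)) t else gf m? t

-- the common normal form: sorted distinct months, each mapped to the lexicographic minimum of its dates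
def pvNorm (l : List String) : List String :=
  (PySem.List.sorted (PySem.Set.ofList (l.map pvMonth)) (fun x => x) false).map
    (fun m => (runmin m l none).getD "")

theorem upd_eq (c : Option String) (x : String) : upd c x = some (min (c.getD x) x) := by
  cases c with
  | none => simp [upd]
  | some v =>
    simp only [upd, Option.getD_some]
    split_ifs with h
    · rw [min_eq_right h.le]
    · rw [min_eq_left (not_lt.mp h)]

theorem pvMonth_toList (s : String) : (pvMonth s).toList = s.toList.take 7 := by
  simp [pvMonth, PySem.Str.toList_slice, PySem.Chars.slice_eq_listSlice]
  rw [PySem.List.slice_to _ (by norm_num : (0:Int) ≤ 7)]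
  rfl

theorem lex_take {n : Nat} {l1 l2 : List Char}
    (h : List.Lex (· < ·) (l1.take n) (l2.take n)) : List.Lex (· < ·) l1 l2 := by
  induction n generalizing l1 l2 with
  | zero => simp at h
  | succ n ih =>
    cases l1 with
    | nil =>
      cases l2 with
      | nil => simp at h
      | cons b t2 => exact List.Lex.nil
    | cons a t1 =>
      cases l2 with
      | nil => simp at h
      | cons b t2 =>
        simp only [List.take_succ_cons] at h
        cases h with
        | rel hr => exact List.Lex.rel hr
        | cons ht => exact List.Lex.cons (ih ht)
theorem pvMonth_mono {a b : String} (h : a ≤ b) : pvMonth a ≤ pvMonth b := by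
  by_contra hlt
  apply absurd h
  rw [not_le] at hlt ⊢
  rw [String.lt_iff_toList_lt] at hlt ⊢
  rw [pvMonth_toList, pvMonth_toList] at hlt
  exact lex_take hlt
theorem bstep_get? (d : PySem.Dict String String) (x : String) (m : String) :
    (bstep d x).get? m = if pvMonth x = m then upd (d.get? m) x else d.get? m := by
  unfold bstep
  cases h : d.get? (pvMonth x) with
  | none =>
    simp only [h]
    rw [PySem.Dict.get?_insert]
    by_cases hm : m = pvMonth x
    · subst hm; simp [h, upd]
    · rw [if_neg hm, if_neg (fun he => hm he.symm)]
  | some v =>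
    simp only [h]
    by_cases hm : m = pvMonth x
    · subst hm
      simp only [h, upd]
      split_ifs with hlt
      · rw [PySem.Dict.get?_insert_self]
      · exact h
    · rw [if_neg (show ¬ pvMonth x = m from fun he => hm he.symm)]
      split_ifs with hlt
      · rw [PySem.Dict.get?_insert]; rw [if_neg hm]
      · rfl

theorem bfold_get? (l : List String) (d : PySem.Dict String String) (m : String) :
    (l.foldl bstep d).get? m = runmin m l (d.get? m) := by
  induction l generalizing d with
  | nil => simp [runmin]
  | cons x t ih =>
    simp only [List.foldl_cons, runmin]
    rw [ih, ← bstep_get?]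
    rfl
theorem bstep_mem_keys (d : PySem.Dict String String) (x m : String) :
    m ∈ (bstep d x).keys ↔ m = pvMonth x ∨ m ∈ d.keys := by
  unfold bstep
  cases h : d.get? (pvMonth x) with
  | none => simp only [h]; simp [PySem.Dict.mem_keys_insert]
  | some v =>
    simp only [h]
    split_ifs with hlt
    · simp [PySem.Dict.mem_keys_insert]
    · exact Iff.intro (fun hm => Or.inr hm) (fun hor => hor.elim (fun he => by rw [← PySem.Dict.contains_iff_mem_keys, he, PySem.Dict.contains_eq_isSome_get?, h]; rfl) id)

theorem bfold_mem_keys (l : List String) (d : PySem.Dict String String) (m : String) :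
    m ∈ (l.foldl bstep d).keys ↔ m ∈ d.keys ∨ m ∈ l.map pvMonth := by
  induction l generalizing d with
  | nil => simp
  | cons x t ih =>
    simp only [List.foldl_cons, List.map_cons, List.mem_cons]
    rw [ih, bstep_mem_keys]
    tauto
theorem bfold_nodup_keys (l : List String) (d : PySem.Dict String String)
    (h : d.keys.Nodup) : (l.foldl bstep d).keys.Nodup := by
  induction l generalizing d with
  | nil => exact h
  | cons x t ih =>
    refine ih _ ?_
    unfold bstep
    cases hg : d.get? (pvMonth x) with
    | none => simp only [hg]; exact PySem.Dict.nodup_keys_insert _ _ _ h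
    | some v =>
      simp only [hg]
      split_ifs with hlt
      · exact PySem.Dict.nodup_keys_insert _ _ _ h
      · simpa using h
theorem alt_eq_norm (xs : List String) : get_month_start_days_py_alt xs = pvNorm xs := by
  show List.map (fun month => (List.foldl bstep PySem.Dict.empty xs).getD month "")
      (PySem.List.sorted (List.foldl bstep PySem.Dict.empty xs).keys (fun x => x) false)
      = pvNorm xs
  unfold pvNorm
  have hkeys : PySem.List.sorted (xs.foldl bstep PySem.Dict.empty).keys (fun x => x) false
      = PySem.List.sorted (PySem.Set.ofList (xs.map pvMonth)) (fun x => x) false := by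
    apply PySem.List.sorted_eq_sorted_of_perm _ _ _ (fun a b hab => hab)
    rw [List.perm_ext_iff_of_nodup
        (bfold_nodup_keys _ _ (by rw [PySem.Dict.keys_empty]; exact List.nodup_nil))
        (PySem.Set.nodup_ofList _)]
    intro a
    rw [bfold_mem_keys, PySem.Set.mem_ofList, PySem.Dict.keys_empty]
    simp
  rw [hkeys]
  exact List.map_congr_left (fun month _ => by
    rw [PySem.Dict.getD_eq_get?_getD, bfold_get?, PySem.Dict.get?_empty])
theorem runmin_comm (m : String) : ∀ (c : Option String) (x y : String),
    (if pvMonth y = m then upd (if pvMonth x = m then upd c x else c) y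
       else (if pvMonth x = m then upd c x else c))
    = (if pvMonth x = m then upd (if pvMonth y = m then upd c y else c) x
       else (if pvMonth y = m then upd c y else c)) := by
  intro c x y
  split_ifs with h1 h2 h2 <;> try rfl
  cases c with
  | none => simp only [upd_eq, Option.getD_none, Option.getD_some, min_self]; rw [min_comm]
  | some v => simp only [upd_eq, Option.getD_some]; rw [min_right_comm]
theorem runmin_perm (m : String) {l1 l2 : List String} (h : l1.Perm l2) (c : Option String) :
    runmin m l1 c = runmin m l2 c := by
  unfold runmin
  exact @List.Perm.foldl_eq _ _ _ _ _ ⟨fun c x y => runmin_comm m c x y⟩ h c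
theorem runmin_of_min (m : String) (l : List String) (v : String)
    (h : ∀ y ∈ l, v ≤ y) : runmin m l (some v) = some v := by
  induction l with
  | nil => rfl
  | cons x t ih =>
    simp only [runmin, List.foldl_cons]
    have hx : v ≤ x := h x (by simp)
    have : (if pvMonth x = m then upd (some v) x else some v) = some v := by
      split_ifs with hm
      · simp only [upd]; rw [if_neg (not_lt.mpr hx)]
      · rfl
    rw [this]
    exact ih (fun y hy => h y (by simp [hy]))
theorem runmin_skip (m : String) (l : List String) (c : Option String)
    (h : ∀ y ∈ l, pvMonth y ≠ m) : runmin m l c = c := by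
  induction l with
  | nil => rfl
  | cons x t ih =>
    simp only [runmin, List.foldl_cons, if_neg (h x (by simp))]
    exact ih (fun y hy => h y (by simp [hy]))
theorem norm_perm {l1 l2 : List String} (h : l1.Perm l2) : pvNorm l1 = pvNorm l2 := by
  unfold pvNorm
  have hkeys : PySem.List.sorted (PySem.Set.ofList (l1.map pvMonth)) (fun x => x) false
      = PySem.List.sorted (PySem.Set.ofList (l2.map pvMonth)) (fun x => x) false := by
    apply PySem.List.sorted_eq_sorted_of_perm _ _ _ (fun a b hab => hab)
    rw [List.perm_ext_iff_of_nodup (PySem.Set.nodup_ofList _) (PySem.Set.nodup_ofList _)]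
    intro a
    rw [PySem.Set.mem_ofList, PySem.Set.mem_ofList]
    exact (h.map pvMonth).mem_iff
  rw [hkeys]
  exact List.map_congr_left (fun m _ => by rw [runmin_perm m h])
theorem afold_eq (l : List String) (acc : List String) (m? : Option String) :
    (l.foldl astep (acc, m?)).1 = acc ++ gf m? l := by
  induction l generalizing acc m? with
  | nil => simp [gf]
  | cons x t ih =>
    simp only [List.foldl_cons, gf]
    by_cases hc : some (pvMonth x) ≠ m?
    · rw [if_pos hc]
      show (t.foldl astep (astep (acc, m?) x)).1 = _
      rw [show astep (acc, m?) x = (acc ++ [x], some (pvMonth x)) from by simp [astep, hc]]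
      rw [ih]
      simp
    · rw [if_neg hc]
      show (t.foldl astep (astep (acc, m?) x)).1 = _
      rw [show astep (acc, m?) x = (acc, m?) from by simp [astep, hc]]
      exact ih acc m?
theorem gf_skip (k : String) : ∀ (l1 : List String), (∀ y ∈ l1, pvMonth y = k) →
    ∀ (l2 : List String), (∀ h r, l2 = h :: r → pvMonth h ≠ k) →
    gf (some k) (l1 ++ l2) = gf none l2 := by
  intro l1
  induction l1 with
  | nil =>
    intro _ l2 h2
    cases l2 with
    | nil => rfl
    | cons h r =>
      simp only [List.nil_append, gf]
      rw [if_pos (by simp [h2 h r rfl]), if_pos (by simp)]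
  | cons y l1 ih =>
    intro h1 l2 h2
    simp only [List.cons_append, gf]
    rw [h1 y List.mem_cons_self, if_neg (by simp)]
    exact ih (fun z hz => h1 z (List.mem_cons_of_mem _ hz)) l2 h2

theorem gf_aux : ∀ (n : Nat) (l : List String), l.length ≤ n → l.Pairwise (· ≤ ·) →
    gf none l = pvNorm l := by
  intro n
  induction n with
  | zero =>
    intro l hlen _
    rw [List.eq_nil_of_length_eq_zero (Nat.le_zero.mp hlen)]
    rfl
  | succ n ih =>
    intro l hlen hpw
    cases l with
    | nil => rfl
    | cons x t =>
      rw [List.pairwise_cons] at hpw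
      obtain ⟨hx_le, ht_pw⟩ := hpw
      set k := pvMonth x with hk
      set t1 := t.takeWhile (fun y => pvMonth y == k) with ht1
      set t2 := t.dropWhile (fun y => pvMonth y == k) with ht2
      have hsplit : t1 ++ t2 = t := List.takeWhile_append_dropWhile
      have hk1 : ∀ y ∈ t1, pvMonth y = k := fun y hy => by
        have := List.mem_takeWhile_imp hy
        simpa using this
      have ht2_sub : t2.Sublist t := List.dropWhile_sublist _
      have ht2_pw : t2.Pairwise (· ≤ ·) := List.Pairwise.sublist ht2_sub ht_pw
      have hhead : ∀ h r, t2 = h :: r → pvMonth h ≠ k := by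
        intro h r he
        have hne : t2 ≠ [] := by rw [he]; simp
        have hd := List.head_dropWhile_not (fun y => pvMonth y == k) (by rw [← ht2]; exact hne)
        simp only [← ht2] at hd
        simp only [he, List.head_cons] at hd
        simpa using hd
      have hmem_t2 : ∀ y ∈ t2, k < pvMonth y := by
        intro y hy
        obtain ⟨h, r, he⟩ : ∃ h r, t2 = h :: r := by
          cases hc : t2 with
          | nil => rw [hc] at hy; simp at hy
          | cons h r => exact ⟨h, r, rfl⟩
        have hh_t2 : h ∈ t2 := by rw [he]; exact List.mem_cons_self
        have hkh : k < pvMonth h := by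
          have hxh : x ≤ h := hx_le h (ht2_sub.mem hh_t2)
          exact lt_of_le_of_ne (pvMonth_mono hxh) (Ne.symm (hhead h r he))
        rw [he] at hy
        rcases List.mem_cons.mp hy with rfl | hyr
        · exact hkh
        · have hhy : h ≤ y := by
            rw [he] at ht2_pw
            exact (List.pairwise_cons.mp ht2_pw).1 y hyr
          exact lt_of_lt_of_le hkh (pvMonth_mono hhy)
      have hlen' : t2.length ≤ n := by
        have h1 : t2.length ≤ t.length := ht2_sub.length_le
        have h2 : t.length ≤ n := by simpa using Nat.succ_le_succ_iff.mp (by simpa using hlen)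
        omega
      have hIH : gf none t2 = pvNorm t2 := ih t2 hlen' ht2_pw
      have hLHS : gf none (x :: t) = x :: gf none t2 := by
        rw [show gf none (x :: t) = x :: gf (some k) t from by simp [gf]; rw [hk]]
        rw [← hsplit, gf_skip k t1 hk1 t2 hhead]
      -- the sorted distinct months of x :: t are k followed by those of t2
      have hS_mem : ∀ m, m ∈ PySem.List.sorted (PySem.Set.ofList (t2.map pvMonth)) (fun x => x) false
          ↔ m ∈ t2.map pvMonth := by
        intro m
        rw [PySem.List.mem_sorted, PySem.Set.mem_ofList]
      have hS_lt : (PySem.List.sorted (PySem.Set.ofList (t2.map pvMonth)) (fun x => x) false).Pairwise (· < ·) :=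
        PySem.List.sorted_ofList_pairwise_lt _
      have hS_gtk : ∀ m ∈ PySem.List.sorted (PySem.Set.ofList (t2.map pvMonth)) (fun x => x) false, k < m := by
        intro m hm
        obtain ⟨y, hy, rfl⟩ := List.mem_map.mp ((hS_mem m).mp hm)
        exact hmem_t2 y hy
      have hsorted : PySem.List.sorted (PySem.Set.ofList ((x :: t).map pvMonth)) (fun x => x) false
          = k :: PySem.List.sorted (PySem.Set.ofList (t2.map pvMonth)) (fun x => x) false := by
        apply PySem.List.sorted_eq_of_perm_of_pairwise_lt
        · rw [List.perm_ext_iff_of_nodup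
            (List.nodup_cons.mpr ⟨fun hkS => lt_irrefl k (hS_gtk k hkS), hS_lt.imp ne_of_lt⟩)
            (PySem.Set.nodup_ofList _)]
          intro a
          rw [PySem.Set.mem_ofList]
          simp only [List.mem_cons, hS_mem, List.map_cons, ← hsplit, List.map_append,
            List.mem_append]
          constructor
          · rintro (rfl | ha)
            · exact Or.inl rfl
            · exact Or.inr (Or.inr ha)
          · rintro (rfl | ha | ha)
            · exact Or.inl rfl
            · obtain ⟨y, hy, rfl⟩ := List.mem_map.mp ha
              exact Or.inl (hk1 y hy)
            · exact Or.inr ha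
        · exact List.pairwise_cons.mpr ⟨hS_gtk, hS_lt⟩
      have hhead_val : runmin k (x :: t) none = some x := by
        show runmin k t (if pvMonth x = k then upd none x else none) = some x
        rw [if_pos rfl]
        exact runmin_of_min k t x hx_le
      have htail_val : ∀ m ∈ PySem.List.sorted (PySem.Set.ofList (t2.map pvMonth)) (fun x => x) false,
          runmin m (x :: t) none = runmin m t2 none := by
        intro m hm
        have hkm : k ≠ m := ne_of_lt (hS_gtk m hm)
        show runmin m t (if pvMonth x = m then upd none x else none) = runmin m t2 none
        rw [if_neg hkm, ← hsplit]
        show List.foldl _ none (t1 ++ t2) = _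
        rw [List.foldl_append]
        rw [show List.foldl (fun c x => if pvMonth x = m then upd c x else c) none t1
            = runmin m t1 none from rfl]
        rw [runmin_skip m t1 none (fun y hy => by rw [hk1 y hy]; exact hkm)]
        rfl
      rw [hLHS, hIH]
      unfold pvNorm
      rw [hsorted, List.map_cons, hhead_val]
      simp only [Option.getD_some]
      refine congrArg (x :: ·) ?_
      exact List.map_congr_left (fun m hm => by rw [htail_val m hm])

theorem gf_sorted_eq_norm : ∀ (l : List String), l.Pairwise (· ≤ ·) → gf none l = pvNorm l := by
  intro l
  exact gf_aux l.length l le_rfl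

theorem a_eq_norm (xs : List String) : get_month_start_days_py xs = pvNorm xs := by
  unfold get_month_start_days_py
  rw [afold_eq, List.nil_append]
  rw [gf_sorted_eq_norm _ (by
    have := PySem.List.sorted_pairwise xs (fun x => x)
    simpa using this)]
  exact norm_perm (PySem.List.sorted_perm xs (fun x => x) false)
theorem get_month_start_days_py_spec : Claim_equal_get_month_start_days_py := by
  intro xs _
  unfold Spec_get_month_start_days_py
  rw [a_eq_norm, alt_eq_norm]
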